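-- pv_equiv track=rewrite | github.com/hungvjpro1234/e-commerce-final | ai-service/app/ml/train_lstm.py | build_confusion_matrix
-- ===== SOURCE A (Python) =====
-- from collections import Counter, defaultdict
-- from typing import Any, Iterable
--
-- def build_confusion_matrix(prediction_rows: list[dict[str, Any]], max_labels: int = 6) -> tuple[list[int], list[list[int]]]:
--     label_counts = Counter(int(row["target_product_id"]) for row in prediction_rows if row.get("target_product_id") is not None)
--     labels = [product_id for product_id, _ in label_counts.most_common(max_labels)]
--     if not labels:
--         return [], []
--
--     matrix = [[0 for _ in labels] for _ in labels]
--     label_to_index = {label: index for index, label in enumerate(labels)}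
--     for row in prediction_rows:
--         target = row.get("target_product_id")
--         predicted = row.get("predicted_product_id")
--         if target in label_to_index and predicted in label_to_index:
--             matrix[label_to_index[int(target)]][label_to_index[int(predicted)]] += 1
--     return labels, matrix
-- ===== SOURCE B (Python) =====
-- from collections import Counter
--
-- def build_confusion_matrix(prediction_rows, max_labels=6):
--     label_counts = Counter()
--     pair_counts = Counter()
--     for row in prediction_rows:
--         target = row.get("target_product_id")
--         predicted = row.get("predicted_product_id")
--         if target is not None:
--             label_counts[int(target)] += 1
--             if predicted is not None:
--                 pair_counts[(int(target), int(predicted))] += 1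
--     labels = [product_id for product_id, _ in label_counts.most_common(max_labels)]
--     if not labels:
--         return [], []
--     matrix = [[pair_counts[(t, p)] for p in labels] for t in labels]
--     return labels, matrix
-- ===== Notes on version B (the rewrite author's own statement) =====
-- stated objective: alternative
-- what changed: Single pass over prediction_rows builds both the label Counter and a (target, predicted) pair Counter, and the matrix is then filled by direct pair-count lookups, replacing A's second scan of the rows and its label_to_index increment loop.
import Mathlib
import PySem

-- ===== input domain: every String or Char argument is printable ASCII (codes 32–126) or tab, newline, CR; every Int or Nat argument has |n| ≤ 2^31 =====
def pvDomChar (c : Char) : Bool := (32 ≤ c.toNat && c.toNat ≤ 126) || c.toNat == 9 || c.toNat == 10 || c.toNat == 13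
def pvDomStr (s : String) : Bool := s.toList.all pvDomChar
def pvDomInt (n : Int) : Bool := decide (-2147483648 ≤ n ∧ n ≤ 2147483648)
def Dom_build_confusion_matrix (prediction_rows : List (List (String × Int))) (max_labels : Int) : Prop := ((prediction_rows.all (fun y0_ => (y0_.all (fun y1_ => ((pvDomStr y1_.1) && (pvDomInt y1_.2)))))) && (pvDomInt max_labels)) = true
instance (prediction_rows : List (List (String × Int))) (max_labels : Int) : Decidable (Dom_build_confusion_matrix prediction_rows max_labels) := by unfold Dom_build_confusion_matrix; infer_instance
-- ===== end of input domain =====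

-- B merges A's two passes over prediction_rows into a single pass that counts target labels and
-- (target, predicted) pairs together, then fills the matrix by direct pair-count lookups instead of a second scan of the rows.

-- ===== PORT A =====
-- row.get(key) on a Python dict passed as an association list
def pvRowGet (row : List (String × Int)) (key : String) : Option Int :=
  (PySem.Dict.mk row).get? key

-- Counter.most_common(n): CPython's heapq.nlargest(n, items, key=count) = stable sort by count
-- descending, then the first n items (empty for n ≤ 0)
def pvMostCommon (items : List (Int × Int)) (n : Int) : List (Int × Int) :=
  (PySem.List.sorted items (fun p => p.2) true).take n.toNat

def build_confusion_matrix (prediction_rows : List (List (String × Int))) (max_labels : Int) :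
    List Int × List (List Int) :=
  -- Counter(int(row["target_product_id"]) for row in prediction_rows if row.get(…) is not None);
  -- the dict values are ints here, so int(·) is the identity
  let label_counts : PySem.Dict Int Int :=
    PySem.Dict.counter (prediction_rows.filterMap (fun row => pvRowGet row "target_product_id"))
  let labels : List Int := (pvMostCommon label_counts.items max_labels).map (fun p => p.1)
  if labels = [] then ([], [])
  else
    let matrix : List (List Int) := labels.map (fun _ => labels.map (fun _ => (0 : Int)))
    let label_to_index : PySem.Dict Int Int :=
      PySem.Dict.ofList ((PySem.List.enumerate labels).map (fun p => (p.2, p.1)))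
    -- 'target in label_to_index' is False when target is None (every key is an int), so the
    -- increment fires exactly when both keys are present and both values are in the dict
    let final : List (List Int) := prediction_rows.foldl (fun m row =>
      match pvRowGet row "target_product_id", pvRowGet row "predicted_product_id" with
      | some t, some p =>
        if label_to_index.contains t && label_to_index.contains p then
          -- matrix[label_to_index[int(target)]][label_to_index[int(predicted)]] += 1
          -- (the indices come from label_to_index, hence are in range)
          m.modify (label_to_index.getD t 0).toNat
            (fun r => r.modify (label_to_index.getD p 0).toNat (fun x => x + 1))
        else m
      | _, _ => m) matrix
    (labels, final)

-- ===== PORT B =====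
def build_confusion_matrix_alt (prediction_rows : List (List (String × Int))) (max_labels : Int) :
    List Int × List (List Int) :=
  -- one pass: Counter of target labels and Counter of (target, predicted) pairs, together
  let counts : PySem.Dict Int Int × PySem.Dict (Int × Int) Int :=
    prediction_rows.foldl (fun lp row =>
      match pvRowGet row "target_product_id" with
      | none => lp
      | some t =>
        match pvRowGet row "predicted_product_id" with
        | none => (lp.1.modify t 0 (fun x => x + 1), lp.2)
        | some p => (lp.1.modify t 0 (fun x => x + 1), lp.2.modify (t, p) 0 (fun x => x + 1)))
      (PySem.Dict.empty, PySem.Dict.empty)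
  let labels : List Int := (pvMostCommon counts.1.items max_labels).map (fun p => p.1)
  if labels = [] then ([], [])
  else (labels, labels.map (fun t => labels.map (fun p => counts.2.getD (t, p) 0)))

-- ===== PRECONDITION & SPEC =====
def Spec_build_confusion_matrix (prediction_rows : List (List (String × Int))) (max_labels : Int) (out : List Int × List (List Int)) : Prop := out = build_confusion_matrix_alt prediction_rows max_labels
instance (prediction_rows : List (List (String × Int))) (max_labels : Int) (out : List Int × List (List Int)) : Decidable (Spec_build_confusion_matrix prediction_rows max_labels out) := by unfold Spec_build_confusion_matrix; infer_instance

-- ===== CLAIM (what is proved, stated in full; the proofs are below) =====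
def Claim_equal_build_confusion_matrix : Prop := ∀ (prediction_rows : List (List (String × Int))) (max_labels : Int), Dom_build_confusion_matrix prediction_rows max_labels → Spec_build_confusion_matrix prediction_rows max_labels (build_confusion_matrix prediction_rows max_labels)

-- ===== LEMMAS AND PROOFS =====

-- the (target, predicted) pair a row contributes, when both keys are present
def pvPair (row : List (String × Int)) : Option (Int × Int) :=
  match pvRowGet row "target_product_id", pvRowGet row "predicted_product_id" with
  | some t, some p => some (t, p)
  | _, _ => none

-- B's single fold over the rows, split into the two counting folds it interleaves
lemma foldB_eq (rows : List (List (String × Int))) (lc : PySem.Dict Int Int)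
    (pc : PySem.Dict (Int × Int) Int) :
    rows.foldl (fun lp row =>
      match pvRowGet row "target_product_id" with
      | none => lp
      | some t =>
        match pvRowGet row "predicted_product_id" with
        | none => (lp.1.modify t 0 (fun x => x + 1), lp.2)
        | some p => (lp.1.modify t 0 (fun x => x + 1), lp.2.modify (t, p) 0 (fun x => x + 1)))
      (lc, pc)
    = ((rows.filterMap (fun row => pvRowGet row "target_product_id")).foldl
         (fun d x => d.modify x 0 (fun v => v + 1)) lc,
       (rows.filterMap pvPair).foldl (fun d x => d.modify x 0 (fun v => v + 1)) pc) := by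
  induction rows generalizing lc pc with
  | nil => rfl
  | cons row rows ih =>
    simp only [List.foldl_cons, List.filterMap_cons]
    cases h1 : pvRowGet row "target_product_id" with
    | none => simp [pvPair, h1, ih]
    | some t =>
      cases h2 : pvRowGet row "predicted_product_id" with
      | none => simp [pvPair, h1, h2, ih]
      | some p => simp [pvPair, h1, h2, ih]

-- A's second loop over the rows, as a fold over the rows' (target, predicted) pairs
lemma foldA_eq (rows : List (List (String × Int))) (d : PySem.Dict Int Int)
    (m : List (List Int)) :
    rows.foldl (fun m row =>
      match pvRowGet row "target_product_id", pvRowGet row "predicted_product_id" with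
      | some t, some p =>
        if d.contains t && d.contains p then
          m.modify (d.getD t 0).toNat (fun r => r.modify (d.getD p 0).toNat (fun x => x + 1))
        else m
      | _, _ => m) m
    = (rows.filterMap pvPair).foldl (fun m q =>
        if d.contains q.1 && d.contains q.2 then
          m.modify (d.getD q.1 0).toNat (fun r => r.modify (d.getD q.2 0).toNat (fun x => x + 1))
        else m) m := by
  induction rows generalizing m with
  | nil => rfl
  | cons row rows ih =>
    simp only [List.foldl_cons, List.filterMap_cons]
    cases h1 : pvRowGet row "target_product_id" with
    | none =>
      have hp : pvPair row = none := by simp [pvPair, h1]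
      simp only [hp]
      exact ih m
    | some t =>
      cases h2 : pvRowGet row "predicted_product_id" with
      | none =>
        have hp : pvPair row = none := by simp [pvPair, h1, h2]
        simp only [hp]
        exact ih m
      | some p =>
        have hp : pvPair row = some (t, p) := by simp [pvPair, h1, h2]
        simp only [hp]
        exact ih _

-- a dict built from an association list with pairwise-distinct keys has exactly those items
lemma items_ofList_of_nodup {κ ν : Type} [BEq κ] [LawfulBEq κ] (ps : List (κ × ν))
    (h : (ps.map (fun p => p.1)).Nodup) : (PySem.Dict.ofList ps).items = ps := by
  show (List.foldl (fun d a => d.insert a.1 a.2) PySem.Dict.empty ps).items = ps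
  rw [PySem.Dict.items_foldl_insert_fresh ps (fun p => p.1) (fun p => p.2) _
    (fun a _ => PySem.Dict.contains_empty _) h]
  have he : (PySem.Dict.empty : PySem.Dict κ ν).items = [] := rfl
  rw [he]
  simp

-- modifying the image of a duplicate-free list at the index of t rewrites exactly the t-entry
lemma modify_map {α β : Type} [DecidableEq α] (l : List α) (f : α → β) (t : α) (upd : β → β)
    (hnd : l.Nodup) (ht : t ∈ l) :
    (l.map f).modify (l.idxOf t) upd = l.map (fun x => if x = t then upd (f x) else f x) := by
  have hlt : l.idxOf t < l.length := List.idxOf_lt_length_of_mem ht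
  apply List.ext_getElem
  · simp
  · intro j h1 h2
    have hj : j < l.length := by simpa using h2
    rw [List.getElem_modify]
    simp only [List.getElem_map]
    by_cases hij : l.idxOf t = j
    · subst hij
      rw [if_pos rfl, if_pos (List.getElem_idxOf hlt)]
    · rw [if_neg hij, if_neg ?_]
      intro he
      apply hij
      have h3 : l[l.idxOf t] = l[j] := by rw [he, List.getElem_idxOf hlt]
      exact (hnd.getElem_inj_iff).mp h3

-- the items of {label: index for index, label in enumerate(labels)}
lemma items_label_to_index (L : List Int) (hnd : L.Nodup) :
    (PySem.Dict.ofList ((PySem.List.enumerate L 0).map (fun p : Int × Int => (p.2, p.1)))).items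
      = (PySem.List.enumerate L 0).map (fun p : Int × Int => (p.2, p.1)) := by
  have hk : (((PySem.List.enumerate L 0).map (fun p : Int × Int => (p.2, p.1))).map
      (fun q : Int × Int => q.1)) = L := by
    rw [List.map_map]
    exact PySem.List.map_snd_enumerate L 0
  exact items_ofList_of_nodup _ (by rw [hk]; exact hnd)

lemma keys_label_to_index (L : List Int) (hnd : L.Nodup) :
    (PySem.Dict.ofList ((PySem.List.enumerate L 0).map (fun p : Int × Int => (p.2, p.1)))).keys = L := by
  have h0 : (PySem.Dict.ofList ((PySem.List.enumerate L 0).map (fun p : Int × Int => (p.2, p.1)))).keys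
      = (PySem.Dict.ofList ((PySem.List.enumerate L 0).map (fun p : Int × Int => (p.2, p.1)))).items.map
        (fun p => p.1) := rfl
  rw [h0, items_label_to_index L hnd, List.map_map]
  exact PySem.List.map_snd_enumerate L 0

lemma contains_label_to_index (L : List Int) (hnd : L.Nodup) (t : Int) :
    (PySem.Dict.ofList ((PySem.List.enumerate L 0).map (fun p : Int × Int => (p.2, p.1)))).contains t
      = decide (t ∈ L) := by
  rw [PySem.Dict.contains_eq_decide_mem_keys, keys_label_to_index L hnd]

lemma getD_label_to_index (L : List Int) (hnd : L.Nodup) (t : Int) (ht : t ∈ L) :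
    (PySem.Dict.ofList ((PySem.List.enumerate L 0).map (fun p : Int × Int => (p.2, p.1)))).getD t 0
      = (L.idxOf t : Int) := by
  have hlt : L.idxOf t < L.length := List.idxOf_lt_length_of_mem ht
  apply PySem.Dict.getD_of_mem_items _ _ (PySem.Dict.nodup_keys_ofList _)
  rw [items_label_to_index L hnd]
  have hmem : ((L.idxOf t : Int), t) ∈ PySem.List.enumerate L 0 := by
    rw [PySem.List.mem_enumerate_iff]
    exact ⟨L.idxOf t, hlt, by simp [List.getElem_idxOf hlt]⟩
  exact List.mem_map_of_mem hmem

-- the grid invariant of A's increment loop: folding the pairs over a g-grid adds the pair counts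
lemma grid_fold (L : List Int) (hnd : L.Nodup) (ps : List (Int × Int)) (g : Int → Int → Int) :
    ps.foldl (fun m q =>
        if q.1 ∈ L ∧ q.2 ∈ L then
          m.modify (L.idxOf q.1) (fun r => r.modify (L.idxOf q.2) (fun x => x + 1))
        else m)
      (L.map (fun t => L.map (fun p => g t p)))
    = L.map (fun t => L.map (fun p => g t p + (ps.count (t, p) : Int))) := by
  induction ps generalizing g with
  | nil => simp
  | cons q ps ih =>
    simp only [List.foldl_cons]
    by_cases hq : q.1 ∈ L ∧ q.2 ∈ L
    · rw [if_pos hq]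
      have hstep : (L.map (fun t => L.map (fun p => g t p))).modify (L.idxOf q.1)
            (fun r => r.modify (L.idxOf q.2) (fun x => x + 1))
          = L.map (fun t => L.map (fun p => if t = q.1 ∧ p = q.2 then g t p + 1 else g t p)) := by
        rw [modify_map L _ q.1 _ hnd hq.1]
        apply List.map_congr_left
        intro t _
        by_cases h1 : t = q.1
        · rw [if_pos h1, modify_map L _ q.2 _ hnd hq.2]
          apply List.map_congr_left
          intro p _
          by_cases h2 : p = q.2
          · rw [if_pos h2, if_pos ⟨h1, h2⟩]
          · rw [if_neg h2, if_neg (fun h => h2 h.2)]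
        · rw [if_neg h1]
          apply List.map_congr_left
          intro p _
          rw [if_neg (fun h => h1 h.1)]
      rw [hstep, ih]
      apply List.map_congr_left
      intro t _
      apply List.map_congr_left
      intro p _
      by_cases h12 : t = q.1 ∧ p = q.2
      · obtain ⟨h1', h2'⟩ := h12
        subst h1'
        subst h2'
        rw [if_pos ⟨rfl, rfl⟩]
        simp
        ring
      · rw [if_neg h12, List.count_cons]
        have hne : (q == (t, p)) = false := by
          apply beq_false_of_ne
          intro he
          exact h12 ⟨(congrArg Prod.fst he).symm, (congrArg Prod.snd he).symm⟩
        rw [hne]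
        simp
    · rw [if_neg hq, ih]
      apply List.map_congr_left
      intro t htL
      apply List.map_congr_left
      intro p hpL
      rw [List.count_cons]
      have hne : (q == (t, p)) = false := by
        apply beq_false_of_ne
        intro he
        exact hq ⟨(congrArg Prod.fst he) ▸ htL, (congrArg Prod.snd he) ▸ hpL⟩
      rw [hne]
      simp

-- the selected labels are pairwise distinct
lemma nodup_labels (items : List (Int × Int)) (h : (items.map (fun p => p.1)).Nodup) (n : Int) :
    ((pvMostCommon items n).map (fun p => p.1)).Nodup := by
  have hperm : (PySem.List.sorted items (fun p => p.2) true).Perm items :=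
    PySem.List.sorted_perm items (fun p => p.2) true
  have hs : ((PySem.List.sorted items (fun p => p.2) true).map (fun p => p.1)).Nodup :=
    ((hperm.map (fun p => p.1)).nodup_iff).mpr h
  have he : (pvMostCommon items n).map (fun p => p.1)
      = ((PySem.List.sorted items (fun p => p.2) true).map (fun p => p.1)).take n.toNat := by
    rw [pvMostCommon, List.map_take]
  rw [he]
  exact (List.take_sublist _ _).nodup hs

-- ===== VERDICT (by name: the statement is the Claim_ definition above) =====
theorem build_confusion_matrix_spec : Claim_equal_build_confusion_matrix := by
  intro rows n _
  unfold Spec_build_confusion_matrix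
  simp only [build_confusion_matrix, build_confusion_matrix_alt]
  rw [foldB_eq, PySem.Dict.counter_eq_foldl]
  simp only []
  set X : PySem.Dict Int Int := (rows.filterMap (fun row => pvRowGet row "target_product_id")).foldl
    (fun d x => d.modify x 0 (fun v => v + 1)) PySem.Dict.empty with hX
  set L : List Int := (pvMostCommon X.items n).map (fun p => p.1) with hL
  by_cases hLnil : L = []
  · simp [hLnil]
  · rw [if_neg hLnil, if_neg hLnil]
    have hnd : L.Nodup := by
      rw [hL]
      apply nodup_labels
      rw [hX, ← PySem.Dict.counter_eq_foldl]
      exact PySem.Dict.nodup_keys_counter _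
    congr 1
    rw [foldA_eq]
    have hfun : (fun (m : List (List Int)) (q : Int × Int) =>
        if ((PySem.Dict.ofList ((PySem.List.enumerate L 0).map (fun p : Int × Int => (p.2, p.1)))).contains q.1
            && (PySem.Dict.ofList ((PySem.List.enumerate L 0).map (fun p : Int × Int => (p.2, p.1)))).contains q.2) = true then
          m.modify ((PySem.Dict.ofList ((PySem.List.enumerate L 0).map (fun p : Int × Int => (p.2, p.1)))).getD q.1 0).toNat
            (fun r => r.modify ((PySem.Dict.ofList ((PySem.List.enumerate L 0).map (fun p : Int × Int => (p.2, p.1)))).getD q.2 0).toNat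
              (fun x => x + 1))
        else m)
      = (fun (m : List (List Int)) (q : Int × Int) =>
          if q.1 ∈ L ∧ q.2 ∈ L then
            m.modify (L.idxOf q.1) (fun r => r.modify (L.idxOf q.2) (fun x => x + 1))
          else m) := by
      funext m q
      rw [contains_label_to_index L hnd, contains_label_to_index L hnd]
      by_cases h1 : q.1 ∈ L
      · by_cases h2 : q.2 ∈ L
        · rw [getD_label_to_index L hnd q.1 h1, getD_label_to_index L hnd q.2 h2]
          simp [h1, h2]
        · simp [h1, h2]
      · simp [h1]
    rw [hfun]
    have hg := grid_fold L hnd (rows.filterMap pvPair) (fun _ _ => (0 : Int))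
    simp only [] at hg
    rw [hg]
    apply List.map_congr_left
    intro t _
    apply List.map_congr_left
    intro p _
    rw [PySem.Dict.getD_foldl_modify_add_one]
    rw [PySem.Dict.getD_empty]
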